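-- pv_equiv track=rewrite | github.com/chenchienlin/Algorithmic-Toolbox | week6/recursive_k_subset_sum.py | k_subset_sum_helper
-- ===== SOURCE A (Python) =====
-- def k_subset_sum_helper(X, i, T_list):
--     if sum(T_list) == 0:
--         return True
--     elif i < 0:
--         return False
--     else:
--         for j in range(len(T_list)):
--             if T_list[j] >= X[i]:
--                 T_list[j] -= X[i]
--                 res = k_subset_sum_helper(X, i-1, T_list)
--                 if res is True:
--                     return True
--                 else:
--                     T_list[j] += X[i]
--         return False
-- ===== SOURCE B (Python) =====
-- def k_subset_sum_helper(X, i, T_list):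
--     # Level-by-level search over the SET of reachable remaining-sum states
--     # (deduplication makes this a DP; A is naive depth-first recursion).
--     # Return-value equivalent to A; B does not mutate T_list (A does).
--     states = {tuple(T_list)}
--     while states:
--         if any(sum(t) == 0 for t in states):
--             return True
--         if i < 0:
--             return False
--         x = X[i]
--         states = {t[:j] + (t[j] - x,) + t[j+1:]
--                   for t in states
--                   for j in range(len(t)) if t[j] >= x}
--         i -= 1
--     return False
-- ===== Notes on version B (the rewrite author's own statement) =====
-- stated objective: alternative
-- what changed: A's depth-first backtracking recursion over bucket choices is replaced by an iterative breadth-first search: a deduplicated set of reachable remaining-sum tuples is advanced one item per step; it trades the recursion stack for an explicit frontier (dedup helps only when many assignment orders reach the same state, which random inputs rarely do).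
import Mathlib
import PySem

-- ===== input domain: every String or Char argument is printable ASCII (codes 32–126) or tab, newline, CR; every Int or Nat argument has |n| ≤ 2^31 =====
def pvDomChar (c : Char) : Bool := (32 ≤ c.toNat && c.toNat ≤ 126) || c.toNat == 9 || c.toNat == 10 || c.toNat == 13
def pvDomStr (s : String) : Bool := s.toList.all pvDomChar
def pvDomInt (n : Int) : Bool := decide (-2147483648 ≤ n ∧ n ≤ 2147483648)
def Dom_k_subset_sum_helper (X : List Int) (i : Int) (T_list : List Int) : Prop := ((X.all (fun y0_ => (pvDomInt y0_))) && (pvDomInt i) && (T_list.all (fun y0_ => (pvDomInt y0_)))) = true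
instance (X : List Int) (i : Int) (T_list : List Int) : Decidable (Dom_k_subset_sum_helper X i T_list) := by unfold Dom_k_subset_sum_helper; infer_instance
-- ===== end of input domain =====

-- B replaces A's naive depth-first recursion by a breadth-first frontier of
-- DEDUPLICATED remaining-sum states (a level DP); equivalence is about the
-- return value only (A mutates T_list along a successful branch, B never does).

-- ===== PORT A =====
-- A's recursion: sum check, i<0 check, then the j-loop with early return
-- (the -=/+= restore makes each iteration act on the original T_list, so the
-- loop is `any` over j of "T_list[j] >= X[i] and recurse on the updated list").
def k_subset_sum_helper (X : List Int) (i : Int) (T_list : List Int) : Bool :=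
  if T_list.sum = 0 then true
  else if i < 0 then false
  else
    (List.range T_list.length).any fun (j : Nat) =>
      decide ((PySem.List.pyGet? X i).getD 0 ≤ (PySem.List.pyGet? T_list (j : Int)).getD 0) &&
      k_subset_sum_helper X (i - 1)
        (T_list.set j ((PySem.List.pyGet? T_list (j : Int)).getD 0 - (PySem.List.pyGet? X i).getD 0))
termination_by (i + 1).toNat
decreasing_by omega
-- X[i] is ported as (pyGet? X i).getD 0: in range (hence exact) under Pre_.

-- ===== PORT B =====
-- one level of B's set comprehension: all successor states, deduplicated
def pvNext (x : Int) (states : List (List Int)) : List (List Int) :=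
  PySem.Set.ofList (states.flatMap fun t =>
    (List.range t.length).filterMap fun (j : Nat) =>
      if x ≤ (PySem.List.pyGet? t (j : Int)).getD 0 then
        some (t.set j ((PySem.List.pyGet? t (j : Int)).getD 0 - x))
      else none)

-- B's while loop over the frontier set
def pvAltGo (X : List Int) (i : Int) (states : List (List Int)) : Bool :=
  if states.isEmpty then false
  else if states.any (fun t => t.sum = 0) then true
  else if i < 0 then false
  else pvAltGo X (i - 1) (pvNext ((PySem.List.pyGet? X i).getD 0) states)
termination_by (i + 2).toNat
decreasing_by omega

def k_subset_sum_helper_alt (X : List Int) (i : Int) (T_list : List Int) : Bool :=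
  pvAltGo X i [T_list]

-- ===== PRECONDITION & SPEC =====
-- Pre_ excludes exactly the inputs where Python A raises IndexError (so does B):
-- sum(T_list) ≠ 0 with 0 ≤ i and i ≥ len(X) makes both evaluate X[i].
def Pre_k_subset_sum_helper (X : List Int) (i : Int) (T_list : List Int) : Prop :=
  T_list.sum = 0 ∨ i < (X.length : Int)
instance (X : List Int) (i : Int) (T_list : List Int) : Decidable (Pre_k_subset_sum_helper X i T_list) := by unfold Pre_k_subset_sum_helper; infer_instance

def pvWitness_k_subset_sum_helper : List Int × Int × List Int := ([1, 2, 3], 2, [3, 3])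

def Spec_k_subset_sum_helper (X : List Int) (i : Int) (T_list : List Int) (out : Bool) : Prop := out = k_subset_sum_helper_alt X i T_list
instance (X : List Int) (i : Int) (T_list : List Int) (out : Bool) : Decidable (Spec_k_subset_sum_helper X i T_list out) := by unfold Spec_k_subset_sum_helper; infer_instance

-- ===== CLAIM (what is proved, stated in full; the proofs are below) =====
def Claim_equal_k_subset_sum_helper : Prop := ∀ (X : List Int) (i : Int) (T_list : List Int), Dom_k_subset_sum_helper X i T_list → Pre_k_subset_sum_helper X i T_list → Spec_k_subset_sum_helper X i T_list (k_subset_sum_helper X i T_list)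

-- ===== LEMMAS AND PROOFS =====

-- deduplication does not change `any` (it is membership-based)
lemma any_set_ofList (L : List (List Int)) (p : List Int → Bool) :
    (PySem.Set.ofList L).any p = L.any p := by
  apply Bool.eq_iff_iff.mpr
  simp [List.any_eq_true, PySem.Set.mem_ofList]

-- frontier invariant: B's loop computes the OR of A's value over the frontier
lemma pvAltGo_eq (X : List Int) (i : Int) (states : List (List Int)) :
    pvAltGo X i states = states.any (fun t => k_subset_sum_helper X i t) := by
  fun_induction pvAltGo X i states with
  | case1 i states h =>
    simp_all [List.isEmpty_iff]
  | case2 i states h1 h2 =>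
    symm
    rw [List.any_eq_true] at h2 ⊢
    obtain ⟨t, ht, hsum⟩ := h2
    refine ⟨t, ht, ?_⟩
    rw [k_subset_sum_helper]
    simp_all
  | case3 i states h1 h2 h3 =>
    symm
    rw [List.any_eq_false]
    intro t ht
    have h2' := List.any_eq_false.mp (Bool.of_not_eq_true h2) t ht
    rw [k_subset_sum_helper]
    simp_all
  | case4 i states h1 h2 h3 ih =>
    rw [ih, pvNext, any_set_ofList]
    apply Bool.eq_iff_iff.mpr
    rw [List.any_eq_true, List.any_eq_true]
    constructor
    · rintro ⟨t', ht', hf⟩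
      rw [List.mem_flatMap] at ht'
      obtain ⟨t, ht, hmem⟩ := ht'
      rw [List.mem_filterMap] at hmem
      obtain ⟨j, hj, hjeq⟩ := hmem
      refine ⟨t, ht, ?_⟩
      rw [k_subset_sum_helper]
      have hsum : ¬ t.sum = 0 := by
        have h2' : states.any (fun t => decide (t.sum = 0)) = false := Bool.of_not_eq_true h2
        have := List.any_eq_false.mp h2' t ht
        simpa using this
      rw [if_neg hsum, if_neg h3, List.any_eq_true]
      refine ⟨j, hj, ?_⟩
      split_ifs at hjeq with hc
      · cases hjeq
        simp only [Bool.and_eq_true, decide_eq_true_eq]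
        exact ⟨hc, hf⟩
    · rintro ⟨t, ht, hf⟩
      rw [k_subset_sum_helper] at hf
      have hsum : ¬ t.sum = 0 := by
        have h2' : states.any (fun t => decide (t.sum = 0)) = false := Bool.of_not_eq_true h2
        have := List.any_eq_false.mp h2' t ht
        simpa using this
      rw [if_neg hsum, if_neg h3, List.any_eq_true] at hf
      obtain ⟨j, hj, hjf⟩ := hf
      simp only [Bool.and_eq_true, decide_eq_true_eq] at hjf
      refine ⟨t.set j ((PySem.List.pyGet? t (j : Int)).getD 0 - (PySem.List.pyGet? X i).getD 0), ?_, hjf.2⟩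
      rw [List.mem_flatMap]
      refine ⟨t, ht, ?_⟩
      rw [List.mem_filterMap]
      exact ⟨j, hj, by rw [if_pos hjf.1]⟩

-- ===== VERDICT (by name: the statement is the Claim_ definition above) =====
theorem k_subset_sum_helper_spec : Claim_equal_k_subset_sum_helper := by
  intro X i T _ _
  unfold Spec_k_subset_sum_helper k_subset_sum_helper_alt
  rw [pvAltGo_eq]
  simp
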